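-- pv_equiv track=rewrite | github.com/justinshenk/temporal-awareness | src/intertemporal/geo_viz/geo_viz_data.py | _find_substring_token_range
-- ===== SOURCE A (Python) =====
-- def _find_substring_token_range(
--     tokens: list[str], text: str, substring: str
-- ) -> list[int]:
--     """Find all token positions spanning a substring in text."""
--     char_idx = text.find(substring)
--     if char_idx == -1:
--         return []
--
--     char_end = char_idx + len(substring)
--     positions = []
--
--     char_count = 0
--     for i, tok in enumerate(tokens):
--         tok_start = char_count
--         tok_end = char_count + len(tok)
--         char_count = tok_end
--
--         if tok_end > char_idx and tok_start < char_end: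
--             positions.append(i)
--
--         if tok_end >= char_end:
--             break
--
--     return positions
-- ===== SOURCE B (Python) =====
-- def _first_index(a, pred):
--     """First index i with pred(a[i]), assuming pred is monotone over a
--     (False on a prefix, True on the rest); len(a) if pred holds nowhere."""
--     lo, hi = 0, len(a)
--     while lo < hi:
--         mid = (lo + hi) // 2
--         if pred(a[mid]):
--             hi = mid
--         else:
--             lo = mid + 1
--     return lo
--
--
-- def _find_substring_token_range(tokens, text, substring):
--     """Find all token positions spanning a substring in text."""
--     char_idx = text.find(substring)
--     if char_idx == -1:
--         return []
--     char_end = char_idx + len(substring)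
--
--     ends = []
--     total = 0
--     for tok in tokens:
--         total += len(tok)
--         ends.append(total)
--     starts = [e - len(t) for e, t in zip(ends, tokens)]
--
--     lo = _first_index(ends, lambda v: v > char_idx)
--     hi = _first_index(starts, lambda v: v >= char_end)
--     return list(range(lo, hi))
-- ===== Notes on version B (the rewrite author's own statement) =====
-- stated objective: alternative
-- what changed: Replaces A's single early-breaking accumulation loop over tokens by building a cumulative end-offset table (plus derived start offsets) and locating the spanned token range with two hand-written binary searches over those monotone offset arrays, returning the contiguous index range directly.
import Mathlib
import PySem

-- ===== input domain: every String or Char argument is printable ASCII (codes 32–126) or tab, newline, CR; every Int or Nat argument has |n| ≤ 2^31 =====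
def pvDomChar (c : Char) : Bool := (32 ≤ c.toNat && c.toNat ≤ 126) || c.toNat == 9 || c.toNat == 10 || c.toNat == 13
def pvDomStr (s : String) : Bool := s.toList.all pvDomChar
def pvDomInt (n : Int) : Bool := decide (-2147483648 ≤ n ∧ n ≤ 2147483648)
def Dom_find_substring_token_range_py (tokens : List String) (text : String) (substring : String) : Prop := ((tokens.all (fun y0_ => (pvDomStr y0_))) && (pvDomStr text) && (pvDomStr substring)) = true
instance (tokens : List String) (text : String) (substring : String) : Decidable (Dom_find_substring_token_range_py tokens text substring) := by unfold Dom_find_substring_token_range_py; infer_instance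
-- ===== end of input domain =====

-- B replaces A's early-breaking accumulation loop by a cumulative-offset table plus two
-- binary searches for the boundary token indices (objective: alternative decomposition).

-- ===== PORT A =====
-- the for-loop of A: i, char_count are the loop state; early return on the break
def pvLoopA (toks : List String) (char_idx char_end : Int) (i : Int) (char_count : Int) : List Int :=
  match toks with
  | [] => []
  | tok :: rest =>
    let tok_start := char_count
    let tok_end := char_count + PySem.Str.len tok
    let here := if tok_end > char_idx ∧ tok_start < char_end then [i] else []
    if tok_end ≥ char_end then here
    else here ++ pvLoopA rest char_idx char_end (i + 1) tok_end

def find_substring_token_range_py (tokens : List String) (text : String) (substring : String) : List Int :=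
  let char_idx := PySem.Str.find text substring
  if char_idx = -1 then []
  else
    let char_end := char_idx + PySem.Str.len substring
    pvLoopA tokens char_idx char_end 0 0

-- ===== PORT B =====
-- Source B's _first_index: first index i in [lo,hi) with pred a[i] (pred monotone), else hi
def pvFirstIdxGo (a : List Int) (p : Int → Bool) (lo hi : Nat) : Nat :=
  if _h : lo < hi then
    let mid := (lo + hi) / 2
    if p (a.getD mid 0) then pvFirstIdxGo a p lo mid
    else pvFirstIdxGo a p (mid + 1) hi
  else lo
termination_by hi - lo
decreasing_by all_goals omega

def pvFirstIdx (a : List Int) (p : Int → Bool) : Nat := pvFirstIdxGo a p 0 a.length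

-- Source B's loop building the cumulative end offsets
def pvEndsLoop (toks : List String) (total : Int) : List Int :=
  match toks with
  | [] => []
  | t :: rest => (total + PySem.Str.len t) :: pvEndsLoop rest (total + PySem.Str.len t)

def find_substring_token_range_py_alt (tokens : List String) (text : String) (substring : String) : List Int :=
  let char_idx := PySem.Str.find text substring
  if char_idx = -1 then []
  else
    let char_end := char_idx + PySem.Str.len substring
    let ends := pvEndsLoop tokens 0
    let starts := (ends.zip tokens).map (fun p => p.1 - PySem.Str.len p.2)
    let lo := pvFirstIdx ends (fun v => decide (char_idx < v))
    let hi := pvFirstIdx starts (fun v => decide (char_end ≤ v))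
    PySem.List.pyRange lo hi 1

-- ===== PRECONDITION & SPEC =====
def Spec_find_substring_token_range_py (tokens : List String) (text : String) (substring : String) (out : List Int) : Prop := out = find_substring_token_range_py_alt tokens text substring
instance (tokens : List String) (text : String) (substring : String) (out : List Int) : Decidable (Spec_find_substring_token_range_py tokens text substring out) := by unfold Spec_find_substring_token_range_py; infer_instance

-- ===== CLAIM (what is proved, stated in full; the proofs are below) =====
def Claim_equal_find_substring_token_range_py : Prop := ∀ (tokens : List String) (text : String) (substring : String), Dom_find_substring_token_range_py tokens text substring → Spec_find_substring_token_range_py tokens text substring (find_substring_token_range_py tokens text substring)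

-- ===== LEMMAS AND PROOFS =====

-- prefix character offset: total length of the first j tokens
def pvS (toks : List String) (j : Nat) : Int := ((toks.map PySem.Str.len).take j).sum

theorem pvS_cons_succ (t : String) (ts : List String) (j : Nat) :
    pvS (t :: ts) (j + 1) = PySem.Str.len t + pvS ts j := by
  simp [pvS]

theorem pvS_nonneg (toks : List String) (j : Nat) : 0 ≤ pvS toks j := by
  apply List.sum_nonneg
  intro x hx
  have hx' := List.mem_of_mem_take hx
  obtain ⟨t, _, rfl⟩ := List.mem_map.1 hx'
  simp [PySem.Str.len_eq]

theorem pvS_succ_getElem (toks : List String) (i : Nat) (h : i < toks.length) :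
    pvS toks (i + 1) = pvS toks i + PySem.Str.len toks[i] := by
  unfold pvS
  rw [List.take_succ]
  have : (toks.map PySem.Str.len)[i]? = some (PySem.Str.len toks[i]) := by
    rw [List.getElem?_map, List.getElem?_eq_getElem h]
    rfl
  simp [this]

theorem pvS_le_succ (toks : List String) (i : Nat) : pvS toks i ≤ pvS toks (i + 1) := by
  unfold pvS
  rw [List.take_succ]
  rw [List.sum_append]
  have : 0 ≤ ((toks.map PySem.Str.len)[i]?.toList).sum := by
    cases hh : (toks.map PySem.Str.len)[i]? with
    | none => simp
    | some x =>
      obtain ⟨t, _, rfl⟩ : ∃ t, t ∈ toks ∧ PySem.Str.len t = x := by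
        rw [List.getElem?_map] at hh
        cases h2 : toks[i]? with
        | none => rw [h2] at hh; simp at hh
        | some t => rw [h2] at hh; simp at hh; exact ⟨t, List.mem_of_getElem? h2, hh⟩
      simp [PySem.Str.len_eq]
  omega

theorem pvS_mono (toks : List String) {i j : Nat} (h : i ≤ j) : pvS toks i ≤ pvS toks j := by
  induction j with
  | zero =>
    have : i = 0 := by omega
    subst this; rfl
  | succ k ih =>
    rcases Nat.lt_or_ge i (k+1) with hlt | hge
    · exact le_trans (ih (by omega)) (pvS_le_succ toks k)
    · have : i = k + 1 := by omega
      subst this; rfl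

theorem pvEndsLoop_length (toks : List String) (total : Int) :
    (pvEndsLoop toks total).length = toks.length := by
  induction toks generalizing total with
  | nil => rfl
  | cons t ts ih => simp [pvEndsLoop, ih]

theorem pvEndsLoop_getElem (toks : List String) (total : Int) (i : Nat)
    (h : i < (pvEndsLoop toks total).length) :
    (pvEndsLoop toks total)[i] = total + pvS toks (i + 1) := by
  induction toks generalizing total i with
  | nil => simp [pvEndsLoop] at h
  | cons t ts ih =>
    cases i with
    | zero => simp [pvEndsLoop, pvS_cons_succ, pvS]
    | succ k =>
      have h' : k < (pvEndsLoop ts (total + PySem.Str.len t)).length := by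
        simp [pvEndsLoop] at h ⊢; omega
      simp only [pvEndsLoop, List.getElem_cons_succ]
      rw [ih _ _ h', pvS_cons_succ]
      ring

theorem pvLoopA_eq (toks : List String) (ci ce : Int) :
    ∀ (i0 cc : Int), pvLoopA toks ci ce i0 cc =
      ((List.range toks.length).filter
        (fun j => decide (cc + pvS toks (j + 1) > ci ∧ cc + pvS toks j < ce))).map
        (fun j : Nat => i0 + (j : Int)) := by
  induction toks with
  | nil => intro i0 cc; rfl
  | cons tok rest ih =>
    intro i0 cc
    have hrange : List.range (tok :: rest).length = 0 :: (List.range rest.length).map (· + 1) := by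
      simp [List.range_succ_eq_map]
    rw [hrange]
    rw [List.filter_cons]
    have hshift : ((List.range rest.length).map (· + 1)).filter
        (fun j => decide (cc + pvS (tok :: rest) (j + 1) > ci ∧ cc + pvS (tok :: rest) j < ce))
      = ((List.range rest.length).filter
        (fun j => decide ((cc + PySem.Str.len tok) + pvS rest (j + 1) > ci
                        ∧ (cc + PySem.Str.len tok) + pvS rest j < ce))).map (· + 1) := by
      rw [List.filter_map]
      congr 1
      apply List.filter_congr
      intro j _
      simp only [Function.comp_apply, pvS_cons_succ]
      rw [decide_eq_decide]
      constructor <;> (rintro ⟨h1, h2⟩; exact ⟨by omega, by omega⟩)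
    rw [hshift]
    show pvLoopA (tok :: rest) ci ce i0 cc = _
    simp only [pvLoopA]
    by_cases hb : cc + PySem.Str.len tok ≥ ce
    · have hempty : (List.range rest.length).filter
          (fun j => decide ((cc + PySem.Str.len tok) + pvS rest (j + 1) > ci
                          ∧ (cc + PySem.Str.len tok) + pvS rest j < ce)) = [] := by
        rw [List.filter_eq_nil_iff]
        intro j _
        have hnn := pvS_nonneg rest j
        simp only [decide_eq_true_eq, not_and, not_lt]
        intro _
        omega
      rw [hempty]
      have h0 : (decide (cc + pvS (tok :: rest) (0 + 1) > ci ∧ cc + pvS (tok :: rest) 0 < ce))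
          = decide (cc + PySem.Str.len tok > ci ∧ cc < ce) := by
        simp [pvS_cons_succ, pvS]
      rw [if_pos hb, h0]
      by_cases hc : cc + PySem.Str.len tok > ci ∧ cc < ce
      · rw [if_pos hc, if_pos (by simpa using hc)]
        simp
      · rw [if_neg hc, if_neg (by simpa using hc)]
        simp
    · rw [if_neg hb]
      rw [ih (i0 + 1) (cc + PySem.Str.len tok)]
      have h0 : (decide (cc + pvS (tok :: rest) (0 + 1) > ci ∧ cc + pvS (tok :: rest) 0 < ce))
          = decide (cc + PySem.Str.len tok > ci ∧ cc < ce) := by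
        simp [pvS_cons_succ, pvS]
      rw [h0]
      by_cases hc : cc + PySem.Str.len tok > ci ∧ cc < ce
      · rw [if_pos hc, if_pos (by simpa using hc)]
        simp only [List.map_cons, List.map_map, Nat.cast_zero, add_zero, List.singleton_append]
        congr 1
        apply List.map_congr_left
        intro a ha
        simp only [Function.comp_apply]
        push_cast
        ring
      · rw [if_neg hc, if_neg (by simpa using hc)]
        simp only [List.map_map, List.nil_append]
        apply List.map_congr_left
        intro a ha
        simp only [Function.comp_apply]
        push_cast
        ring

theorem pvFirstIdxGo_spec (a : List Int) (p : Int → Bool)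
    (hmono : ∀ i j : Nat, i ≤ j → j < a.length → p (a.getD i 0) = true → p (a.getD j 0) = true) :
    ∀ (lo hi : Nat), lo ≤ hi → hi ≤ a.length →
    (∀ i : Nat, i < lo → p (a.getD i 0) = false) →
    (∀ i : Nat, hi ≤ i → i < a.length → p (a.getD i 0) = true) →
    lo ≤ pvFirstIdxGo a p lo hi ∧ pvFirstIdxGo a p lo hi ≤ hi ∧
    (∀ i : Nat, i < pvFirstIdxGo a p lo hi → p (a.getD i 0) = false) ∧
    (∀ i : Nat, pvFirstIdxGo a p lo hi ≤ i → i < a.length → p (a.getD i 0) = true) := by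
  intro lo hi
  induction hfuel : hi - lo using Nat.strong_induction_on generalizing lo hi with
  | _ n ihn =>
  intro hlohi hhi hbelow habove
  rw [pvFirstIdxGo]
  by_cases h : lo < hi
  · rw [dif_pos h]
    simp only []
    set mid := (lo + hi) / 2 with hmid
    have hm1 : lo ≤ mid := by omega
    have hm2 : mid < hi := by omega
    by_cases hp : p (a.getD mid 0) = true
    · rw [if_pos hp]
      have := ihn (mid - lo) (by omega) lo mid rfl (by omega) (by omega) hbelow
        (fun i hi1 hi2 => hmono mid i (by omega) hi2 hp)
      exact ⟨this.1, by omega, this.2.2.1, this.2.2.2⟩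
    · rw [if_neg hp]
      have hb' : ∀ i : Nat, i < mid + 1 → p (a.getD i 0) = false := by
        intro i hi1
        by_cases hil : i < lo
        · exact hbelow i hil
        · rcases Bool.eq_false_or_eq_true (p (a.getD i 0)) with ht | hf
          · exact absurd (hmono i mid (by omega) (by omega) ht) hp
          · exact hf
      have := ihn (hi - (mid + 1)) (by omega) (mid + 1) hi rfl (by omega) hhi hb' habove
      exact ⟨by omega, this.2.1, this.2.2.1, this.2.2.2⟩
  · rw [dif_neg h]
    have : lo = hi := by omega
    subst this
    exact ⟨le_refl _, le_refl _, hbelow, fun i hi1 hi2 => habove i (by omega) hi2⟩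

theorem pvFilter_range_interval : ∀ (n r1 r2 : Nat), r2 ≤ n →
    (List.range n).filter (fun i => decide (r1 ≤ i ∧ i < r2)) = List.range' r1 (r2 - r1) := by
  intro n
  induction n with
  | zero => intro r1 r2 h; have : r2 = 0 := by omega
            subst this; simp
  | succ n ih =>
    intro r1 r2 h
    by_cases hle : r2 ≤ r1
    · rw [List.filter_eq_nil_iff.2, (by omega : r2 - r1 = 0)]
      · rfl
      · intro a _; simp; omega
    · rw [List.range_succ, List.filter_append]
      by_cases h2 : r2 ≤ n
      · rw [ih r1 r2 h2]
        have : (List.filter (fun i => decide (r1 ≤ i ∧ i < r2)) [n]) = [] := by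
          simp; omega
        rw [this, List.append_nil]
      · have hr2 : r2 = n + 1 := by omega
        subst hr2
        have hcong : (List.range n).filter (fun i => decide (r1 ≤ i ∧ i < n + 1))
            = (List.range n).filter (fun i => decide (r1 ≤ i ∧ i < n)) := by
          apply List.filter_congr
          intro i hi
          simp only [List.mem_range] at hi
          rw [decide_eq_decide]
          omega
        rw [hcong, ih r1 n (le_refl n)]
        have hn : (List.filter (fun i => decide (r1 ≤ i ∧ i < n + 1)) [n]) = [n] := by
          simp; omega
        rw [hn]
        have hr1 : r1 ≤ n := by omega
        have : n + 1 - r1 = (n - r1) + 1 := by omega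
        rw [this, List.range'_concat]
        congr 2
        omega

theorem pvEnds_getD (toks : List String) (i : Nat) (h : i < toks.length) :
    (pvEndsLoop toks 0).getD i 0 = pvS toks (i + 1) := by
  rw [List.getD_eq_getElem _ _ (by rw [pvEndsLoop_length]; exact h)]
  rw [pvEndsLoop_getElem toks 0 i (by rw [pvEndsLoop_length]; exact h)]
  ring

theorem pvStarts_length (toks : List String) :
    (((pvEndsLoop toks 0).zip toks).map (fun p => p.1 - PySem.Str.len p.2)).length = toks.length := by
  simp [List.length_zip, pvEndsLoop_length]

theorem pvStarts_getD (toks : List String) (i : Nat) (h : i < toks.length) :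
    (((pvEndsLoop toks 0).zip toks).map (fun p => p.1 - PySem.Str.len p.2)).getD i 0
      = pvS toks i := by
  rw [List.getD_eq_getElem _ _ (by rw [pvStarts_length]; exact h)]
  simp only [List.getElem_map, List.getElem_zip]
  rw [pvEndsLoop_getElem toks 0 i (by rw [pvEndsLoop_length]; exact h)]
  rw [pvS_succ_getElem toks i h]
  have h2 : toks[i].length = PySem.Str.len toks[i] := by simp [PySem.Str.len_eq]
  omega

theorem pvCore (tokens : List String) (ci ce : Int) :
    pvLoopA tokens ci ce 0 0 =
    PySem.List.pyRange
      (pvFirstIdx (pvEndsLoop tokens 0) (fun v => decide (ci < v)))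
      (pvFirstIdx (((pvEndsLoop tokens 0).zip tokens).map (fun p => p.1 - PySem.Str.len p.2))
        (fun v => decide (ce ≤ v))) 1 := by
  have hlen_e : (pvEndsLoop tokens 0).length = tokens.length := pvEndsLoop_length tokens 0
  have hlen_s := pvStarts_length tokens
  have hspec1 := pvFirstIdxGo_spec (pvEndsLoop tokens 0) (fun v => decide (ci < v))
    (by
      intro i j hij hj hp
      have hj' : j < tokens.length := by omega
      have hi' : i < tokens.length := by omega
      rw [pvEnds_getD tokens i hi'] at hp
      rw [pvEnds_getD tokens j hj']
      simp only [decide_eq_true_eq] at hp ⊢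
      have := pvS_mono tokens (show i + 1 ≤ j + 1 by omega)
      omega)
    0 (pvEndsLoop tokens 0).length (by omega) (by omega)
    (fun i h => absurd h (by omega))
    (fun i h1 h2 => absurd h2 (by omega))
  have hspec2 := pvFirstIdxGo_spec
      (((pvEndsLoop tokens 0).zip tokens).map (fun p => p.1 - PySem.Str.len p.2))
      (fun v => decide (ce ≤ v))
    (by
      intro i j hij hj hp
      have hj' : j < tokens.length := by omega
      have hi' : i < tokens.length := by omega
      rw [pvStarts_getD tokens i hi'] at hp
      rw [pvStarts_getD tokens j hj']
      simp only [decide_eq_true_eq] at hp ⊢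
      have := pvS_mono tokens hij
      omega)
    0 (((pvEndsLoop tokens 0).zip tokens).map (fun p => p.1 - PySem.Str.len p.2)).length
    (by omega) (by omega)
    (fun i h => absurd h (by omega))
    (fun i h1 h2 => absurd h2 (by omega))
  obtain ⟨-, h1le, h1no, h1yes⟩ := hspec1
  obtain ⟨-, h2le, h2no, h2yes⟩ := hspec2
  rw [pvLoopA_eq tokens ci ce 0 0]
  rw [show pvFirstIdxGo (pvEndsLoop tokens 0) (fun v => decide (ci < v)) 0
        (pvEndsLoop tokens 0).length
      = pvFirstIdx (pvEndsLoop tokens 0) (fun v => decide (ci < v)) from rfl] at h1le h1no h1yes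
  rw [show pvFirstIdxGo (((pvEndsLoop tokens 0).zip tokens).map (fun p => p.1 - PySem.Str.len p.2))
        (fun v => decide (ce ≤ v)) 0
        (((pvEndsLoop tokens 0).zip tokens).map (fun p => p.1 - PySem.Str.len p.2)).length
      = pvFirstIdx (((pvEndsLoop tokens 0).zip tokens).map (fun p => p.1 - PySem.Str.len p.2))
        (fun v => decide (ce ≤ v)) from rfl] at h2le h2no h2yes
  have hcong : (List.range tokens.length).filter
      (fun j => decide (0 + pvS tokens (j + 1) > ci ∧ 0 + pvS tokens j < ce))
      = (List.range tokens.length).filter (fun j => decide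
          (pvFirstIdx (pvEndsLoop tokens 0) (fun v => decide (ci < v)) ≤ j ∧
           j < pvFirstIdx (((pvEndsLoop tokens 0).zip tokens).map
                 (fun p => p.1 - PySem.Str.len p.2)) (fun v => decide (ce ≤ v)))) := by
    apply List.filter_congr
    intro j hj
    simp only [List.mem_range] at hj
    rw [decide_eq_decide]
    constructor
    · rintro ⟨h1, h2⟩
      constructor
      · by_contra hlt
        have := h1no j (by omega)
        rw [pvEnds_getD tokens j hj] at this
        simp only [decide_eq_false_iff_not] at this
        omega
      · by_contra hge
        have := h2yes j (by omega) (by omega)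
        rw [pvStarts_getD tokens j hj] at this
        simp only [decide_eq_true_eq] at this
        omega
    · rintro ⟨h1, h2⟩
      have he := h1yes j (by omega) (by omega)
      rw [pvEnds_getD tokens j hj] at he
      simp only [decide_eq_true_eq] at he
      have hs := h2no j (by omega)
      rw [pvStarts_getD tokens j hj] at hs
      simp only [decide_eq_false_iff_not] at hs
      constructor <;> omega
  rw [hcong, pvFilter_range_interval tokens.length _ _ (by omega)]
  rw [PySem.List.pyRange_one]
  have htn : ∀ (r1 r2 : Nat), ((r2 : Int) - (r1 : Int)).toNat = r2 - r1 := by intro r1 r2; omega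
  rw [htn, List.range'_eq_map_range]
  rw [List.map_map]
  apply List.map_congr_left
  intro k _
  simp only [Function.comp_apply]
  push_cast
  ring

-- ===== VERDICT (by name: the statement is the Claim_ definition above) =====
theorem find_substring_token_range_py_spec : Claim_equal_find_substring_token_range_py := by
  intro tokens text substring _
  unfold Spec_find_substring_token_range_py
  unfold find_substring_token_range_py find_substring_token_range_py_alt
  by_cases hf : PySem.Str.find text substring = -1
  · simp only [if_pos hf]
  · simp only [if_neg hf]
    exact pvCore tokens (PySem.Str.find text substring)
      (PySem.Str.find text substring + PySem.Str.len substring)
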